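-- pv_equiv track=rewrite | github.com/retallickj/qca-embedding | gui/src/core/chimera.py | generate_chimera_adj
-- ===== SOURCE A (Python) =====
-- from itertools import product
--
-- def generate_chimera_adj(M, N, L=4):
--     '''Generate a full chimera adjacency dict of size MxN'''
--
--     adj = {}
--
--     # intra-tile connections
--     for m, n, h, l in product(range(M), range(N), range(2), range(L)):
--         adj[(m, n, h, l)] = [(m,n,1-h,x) for x in range(L)]
--
--     # horizontal inter-tile connections
--     for m, n, l in product(range(M), range(N-1), range(L)):
--         adj[(m, n, 1, l)].append((m, n+1, 1, l))
--         adj[(m, n+1, 1, l)].append((m, n, 1, l))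
--
--     # vertical inter-tile connections
--     for m, n, l in product(range(M-1), range(N), range(L)):
--         adj[(m, n, 0, l)].append((m+1, n, 0, l))
--         adj[(m+1, n, 0, l)].append((m, n, 0, l))
--
--     return adj
-- ===== SOURCE B (Python) =====
-- from itertools import product
--
-- def generate_chimera_adj(M, N, L=4):
--     '''Generate a full chimera adjacency dict of size MxN'''
--
--     adj = {}
--     # single sweep: each node's complete neighbour list is built at once
--     for m, n, h, l in product(range(M), range(N), range(2), range(L)):
--         nbrs = [(m, n, 1-h, x) for x in range(L)]
--         if h:
--             if n > 0:
--                 nbrs.append((m, n-1, 1, l))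
--             if n < N-1:
--                 nbrs.append((m, n+1, 1, l))
--         else:
--             if m > 0:
--                 nbrs.append((m-1, n, 0, l))
--             if m < M-1:
--                 nbrs.append((m+1, n, 0, l))
--         adj[(m, n, h, l)] = nbrs
--     return adj
-- ===== Notes on version B (the rewrite author's own statement) =====
-- stated objective: simpler
-- what changed: Builds each node's complete adjacency list (intra-tile block plus boundary-guarded left/right or up/down inter-tile edges) in one sweep over the node product, instead of populating the dict and then mutating it in two further append passes.
import Mathlib
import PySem

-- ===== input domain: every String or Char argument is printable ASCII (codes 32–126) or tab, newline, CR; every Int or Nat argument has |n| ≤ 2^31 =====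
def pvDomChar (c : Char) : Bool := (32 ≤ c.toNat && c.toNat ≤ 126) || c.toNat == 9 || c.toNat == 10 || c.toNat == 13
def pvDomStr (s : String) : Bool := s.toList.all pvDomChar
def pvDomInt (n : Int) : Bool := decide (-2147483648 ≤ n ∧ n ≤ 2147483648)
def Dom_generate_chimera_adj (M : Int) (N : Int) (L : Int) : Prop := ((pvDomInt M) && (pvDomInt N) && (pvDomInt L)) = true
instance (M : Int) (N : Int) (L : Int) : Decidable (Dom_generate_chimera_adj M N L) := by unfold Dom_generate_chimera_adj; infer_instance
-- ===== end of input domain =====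

-- B builds each node's complete neighbour list in one sweep over the node product instead of
-- A's populate-then-mutate three passes; objective: simpler (same asymptotic cost).

-- ===== PORT A =====
-- itertools.product(range(M), range(N), range(2), range(L)), lexicographic order
def chimNodes (M N L : Int) : List (Int × Int × Int × Int) :=
  (PySem.List.pyRange 0 M 1).flatMap (fun m =>
    (PySem.List.pyRange 0 N 1).flatMap (fun n =>
      (PySem.List.pyRange 0 2 1).flatMap (fun h =>
        (PySem.List.pyRange 0 L 1).map (fun l => (m, n, h, l)))))

-- itertools.product(range(A), range(B), range(C)), lexicographic order
def chimTriples (A B C : Int) : List (Int × Int × Int) :=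
  (PySem.List.pyRange 0 A 1).flatMap (fun m =>
    (PySem.List.pyRange 0 B 1).flatMap (fun n =>
      (PySem.List.pyRange 0 C 1).map (fun l => (m, n, l))))

def generate_chimera_adj (M : Int) (N : Int) (L : Int) :
    List (Int × Int × Int × Int × List (Int × Int × Int × Int)) :=
  -- adj = {}; intra-tile pass: adj[(m,n,h,l)] = [(m,n,1-h,x) for x in range(L)]
  let adj0 : PySem.Dict (Int × Int × Int × Int) (List (Int × Int × Int × Int)) :=
    (chimNodes M N L).foldl
      (fun d k => d.insert k
        ((PySem.List.pyRange 0 L 1).map (fun x => (k.1, k.2.1, 1 - k.2.2.1, x))))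
      PySem.Dict.empty
  -- horizontal inter-tile pass (two appends per iteration; keys always present, so modify is exact)
  let adj1 :=
    (chimTriples M (N - 1) L).foldl
      (fun d t =>
        ((d.modify (t.1, t.2.1, 1, t.2.2) [] (· ++ [(t.1, t.2.1 + 1, 1, t.2.2)])).modify
          (t.1, t.2.1 + 1, 1, t.2.2) [] (· ++ [(t.1, t.2.1, 1, t.2.2)])))
      adj0
  -- vertical inter-tile pass
  let adj2 :=
    (chimTriples (M - 1) N L).foldl
      (fun d t =>
        ((d.modify (t.1, t.2.1, 0, t.2.2) [] (· ++ [(t.1 + 1, t.2.1, 0, t.2.2)])).modify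
          (t.1 + 1, t.2.1, 0, t.2.2) [] (· ++ [(t.1, t.2.1, 0, t.2.2)])))
      adj1
  adj2.items.map (fun p => (p.1.1, p.1.2.1, p.1.2.2.1, p.1.2.2.2, p.2))

-- ===== PORT B =====
def generate_chimera_adj_alt (M : Int) (N : Int) (L : Int) :
    List (Int × Int × Int × Int × List (Int × Int × Int × Int)) :=
  (PySem.List.pyRange 0 M 1).flatMap (fun m =>
    (PySem.List.pyRange 0 N 1).flatMap (fun n =>
      (PySem.List.pyRange 0 2 1).flatMap (fun h =>
        (PySem.List.pyRange 0 L 1).map (fun l =>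
          (m, n, h, l,
            ((PySem.List.pyRange 0 L 1).map (fun x => (m, n, 1 - h, x))) ++
            (if h ≠ 0 then
              (if 0 < n then [(m, n - 1, 1, l)] else []) ++
              (if n < N - 1 then [(m, n + 1, 1, l)] else [])
            else
              (if 0 < m then [(m - 1, n, 0, l)] else []) ++
              (if m < M - 1 then [(m + 1, n, 0, l)] else [])))))))

-- ===== PRECONDITION & SPEC =====
def Spec_generate_chimera_adj (M : Int) (N : Int) (L : Int) (out : List (Int × Int × Int × Int × List (Int × Int × Int × Int))) : Prop := out = generate_chimera_adj_alt M N L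
instance (M : Int) (N : Int) (L : Int) (out : List (Int × Int × Int × Int × List (Int × Int × Int × Int))) : Decidable (Spec_generate_chimera_adj M N L out) := by
  unfold Spec_generate_chimera_adj
  have hL : DecidableEq (List (Int × Int × Int × Int)) := inferInstance
  infer_instance

-- ===== CLAIM (what is proved, stated in full; the proofs are below) =====
def Claim_equal_generate_chimera_adj : Prop := ∀ (M : Int) (N : Int) (L : Int), Dom_generate_chimera_adj M N L → Spec_generate_chimera_adj M N L (generate_chimera_adj M N L)

-- ===== LEMMAS AND PROOFS =====

-- the two append passes, flattened to single-append operation lists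
def opsH (M N L : Int) : List ((Int × Int × Int × Int) × (Int × Int × Int × Int)) :=
  (chimTriples M (N - 1) L).flatMap (fun t =>
    [((t.1, t.2.1, 1, t.2.2), (t.1, t.2.1 + 1, 1, t.2.2)),
     ((t.1, t.2.1 + 1, 1, t.2.2), (t.1, t.2.1, 1, t.2.2))])

def opsV (M N L : Int) : List ((Int × Int × Int × Int) × (Int × Int × Int × Int)) :=
  (chimTriples (M - 1) N L).flatMap (fun t =>
    [((t.1, t.2.1, 0, t.2.2), (t.1 + 1, t.2.1, 0, t.2.2)),
     ((t.1 + 1, t.2.1, 0, t.2.2), (t.1, t.2.1, 0, t.2.2))])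

lemma mem_chimNodes {M N L m n h l : Int} :
    ((m, n, h, l) : Int × Int × Int × Int) ∈ chimNodes M N L ↔
      (0 ≤ m ∧ m < M) ∧ (0 ≤ n ∧ n < N) ∧ (0 ≤ h ∧ h < 2) ∧ (0 ≤ l ∧ l < L) := by
  simp [chimNodes, List.mem_flatMap, List.mem_map, PySem.List.mem_pyRange_one, Prod.mk.injEq]

lemma nodup_flatMap_tag {α β : Type} (l : List α) (f : α → List β) (tag : β → α)
    (hl : l.Nodup) (hf : ∀ a ∈ l, (f a).Nodup)
    (htag : ∀ a ∈ l, ∀ b ∈ f a, tag b = a) : (l.flatMap f).Nodup := by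
  rw [List.nodup_flatMap]
  refine ⟨hf, ?_⟩
  refine List.Pairwise.imp_of_mem ?_ hl
  intro a b ha hb hne x hxa hxb
  exact hne (by rw [← htag a ha x hxa, htag b hb x hxb])

lemma chimNodes_nodup (M N L : Int) : (chimNodes M N L).Nodup := by
  refine nodup_flatMap_tag _ _ (fun t => t.1) (PySem.List.nodup_pyRange_one 0 M) ?_ ?_
  · intro m _
    refine nodup_flatMap_tag _ _ (fun t => t.2.1) (PySem.List.nodup_pyRange_one 0 N) ?_ ?_
    · intro n _
      refine nodup_flatMap_tag _ _ (fun t => t.2.2.1) (PySem.List.nodup_pyRange_one 0 2) ?_ ?_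
      · intro h _
        exact (PySem.List.nodup_pyRange_one 0 L).map (fun a b e => by simpa using e)
      · intro h _ b hb
        simp only [List.mem_map] at hb
        obtain ⟨x, _, rfl⟩ := hb
        rfl
    · intro n _ b hb
      simp only [List.mem_flatMap, List.mem_map] at hb
      obtain ⟨h, _, x, _, rfl⟩ := hb
      rfl
  · intro m _ b hb
    simp only [List.mem_flatMap, List.mem_map] at hb
    obtain ⟨n, _, h, _, x, _, rfl⟩ := hb
    rfl

-- a loop doing two appends per element is the flattened single-append loop
lemma foldl_two_modify {K V T : Type} [BEq K] (l : List T)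
    (k1 k2 : T → K) (v1 v2 : T → V) (d : PySem.Dict K (List V)) :
    l.foldl (fun d t => ((d.modify (k1 t) [] (· ++ [v1 t])).modify (k2 t) [] (· ++ [v2 t]))) d
    = (l.flatMap (fun t => [(k1 t, v1 t), (k2 t, v2 t)])).foldl
        (fun d p => d.modify p.1 [] (· ++ [p.2])) d := by
  induction l generalizing d with
  | nil => rfl
  | cons a l ih => simp only [List.foldl_cons, List.flatMap_cons, List.foldl_append, ih]; rfl

-- Set.update is a no-op when every new element is already present
lemma set_update_of_subset {K : Type} [BEq K] [LawfulBEq K] (s : PySem.Set K) (xs : List K)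
    (h : ∀ x ∈ xs, x ∈ s) : PySem.Set.update s xs = s := by
  rw [PySem.Set.update_eq_append_filter]
  have hnil : (PySem.Set.ofList xs).filter (fun y => !PySem.Set.contains s y) = [] := by
    rw [List.filter_eq_nil_iff]
    intro a ha
    have haxs : a ∈ xs := (PySem.Set.mem_ofList xs a).mp ha
    simp [PySem.Set.contains_eq_listContains, h a haxs]
  rw [hnil, List.append_nil]

-- both single-if summands live at the same in-range point j
lemma flatMap_pyRange_pointpair {α : Type} (C D : Int → Prop) [DecidablePred C] [DecidablePred D]
    (P Q : Prop) [Decidable P] [Decidable Q] (u v : Int → List α) (j : Int)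
    (hC : ∀ x, C x ↔ P ∧ x = j) (hD : ∀ x, D x ↔ Q ∧ x = j) :
    ∀ (n : Nat) (a b : Int), (b - a).toNat = n →
    (PySem.List.pyRange a b 1).flatMap (fun x => (if C x then u x else []) ++ (if D x then v x else []))
    = if a ≤ j ∧ j < b then ((if P then u j else []) ++ (if Q then v j else [])) else []
  | 0, a, b, hfuel => by
      rw [PySem.List.pyRange_one_eq_nil (by omega), List.flatMap_nil, if_neg (by omega)]
  | (n+1), a, b, hfuel => by
      rw [PySem.List.pyRange_one_cons (by omega), List.flatMap_cons,
          flatMap_pyRange_pointpair C D P Q u v j hC hD n (a+1) b (by omega)]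
      by_cases haj : a = j
      · subst haj
        rw [if_neg (show ¬((a:Int) + 1 ≤ a ∧ a < b) by omega),
            if_pos (show (a ≤ a ∧ a < b) by omega), List.append_nil]
        by_cases hP : P <;> by_cases hQ : Q <;> simp [hC a, hD a, hP, hQ]
      · rw [if_neg (show ¬ C a from fun hc => haj ((hC a).mp hc).2),
            if_neg (show ¬ D a from fun hc => haj ((hD a).mp hc).2)]
        have e : ((a + 1 : Int) ≤ j ∧ j < b) ↔ (a ≤ j ∧ j < b) := by omega
        simp only [e, List.nil_append]

-- first summand at the larger point k, second at the smaller point j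
lemma flatMap_pyRange_doublepoint {α : Type} (C D : Int → Prop) [DecidablePred C] [DecidablePred D]
    (P Q : Prop) [Decidable P] [Decidable Q] (u v : Int → List α) (j k : Int) (hjk : j < k)
    (hC : ∀ x, C x ↔ P ∧ x = k) (hD : ∀ x, D x ↔ Q ∧ x = j) :
    ∀ (n : Nat) (a b : Int), (b - a).toNat = n →
    (PySem.List.pyRange a b 1).flatMap (fun x => (if C x then u x else []) ++ (if D x then v x else []))
    = (if Q ∧ a ≤ j ∧ j < b then v j else []) ++ (if P ∧ a ≤ k ∧ k < b then u k else [])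
  | 0, a, b, hfuel => by
      rw [PySem.List.pyRange_one_eq_nil (by omega), List.flatMap_nil,
          if_neg (show ¬(Q ∧ a ≤ j ∧ j < b) from fun hh => by omega),
          if_neg (show ¬(P ∧ a ≤ k ∧ k < b) from fun hh => by omega)]
      rfl
  | (n+1), a, b, hfuel => by
      rw [PySem.List.pyRange_one_cons (by omega), List.flatMap_cons,
          flatMap_pyRange_doublepoint C D P Q u v j k hjk hC hD n (a+1) b (by omega)]
      by_cases haj : a = j
      · subst haj
        rw [if_neg (show ¬ C a from fun hc => by have := ((hC a).mp hc).2; omega)]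
        have e1 : ¬(Q ∧ (a + 1 : Int) ≤ a ∧ a < b) := by omega
        have e2 : ((P ∧ (a + 1 : Int) ≤ k ∧ k < b)) ↔ (P ∧ a ≤ k ∧ k < b) := by
          constructor <;> (rintro ⟨h1, h2, h3⟩; exact ⟨h1, by omega, h3⟩)
        simp only [e1, if_false, List.nil_append, e2]
        by_cases hQ : Q
        · rw [if_pos (show D a from (hD a).mpr ⟨hQ, rfl⟩),
              if_pos (show Q ∧ a ≤ a ∧ a < b from ⟨hQ, by omega⟩)]
        · rw [if_neg (show ¬ D a from fun hc => hQ ((hD a).mp hc).1),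
              if_neg (show ¬(Q ∧ a ≤ a ∧ a < b) from fun hc => hQ hc.1)]
      · by_cases hak : a = k
        · subst hak
          rw [if_neg (show ¬ D a from fun hc => haj ((hD a).mp hc).2)]
          have e1 : ¬(Q ∧ (a + 1 : Int) ≤ j ∧ j < b) := by omega
          have e1' : ¬(Q ∧ (a : Int) ≤ j ∧ j < b) := by omega
          have e2 : ¬(P ∧ (a + 1 : Int) ≤ a ∧ a < b) := by omega
          simp only [e1, e1', e2, if_false, List.nil_append, List.append_nil]
          by_cases hP : P
          · rw [if_pos (show C a from (hC a).mpr ⟨hP, rfl⟩),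
                if_pos (show P ∧ a ≤ a ∧ a < b from ⟨hP, by omega⟩)]
          · rw [if_neg (show ¬ C a from fun hc => hP ((hC a).mp hc).1),
                if_neg (show ¬(P ∧ a ≤ a ∧ a < b) from fun hc => hP hc.1)]
        · rw [if_neg (show ¬ C a from fun hc => hak ((hC a).mp hc).2),
              if_neg (show ¬ D a from fun hc => haj ((hD a).mp hc).2)]
          have e1 : (Q ∧ (a + 1 : Int) ≤ j ∧ j < b) ↔ (Q ∧ a ≤ j ∧ j < b) := by
            constructor <;> (rintro ⟨h1, h2, h3⟩; exact ⟨h1, by omega, h3⟩)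
          have e2 : (P ∧ (a + 1 : Int) ≤ k ∧ k < b) ↔ (P ∧ a ≤ k ∧ k < b) := by
            constructor <;> (rintro ⟨h1, h2, h3⟩; exact ⟨h1, by omega, h3⟩)
          simp only [e1, e2, List.nil_append]

lemma filtermap_pair {α K : Type} [BEq K] (p1 p2 : K) (q1 q2 : α) (k : K) :
    ((([(p1, q1), (p2, q2)]) : List (K × α)).filter (fun p => p.1 == k)).map (fun p => p.2)
    = (if p1 == k then [q1] else []) ++ (if p2 == k then [q2] else []) := by
  by_cases h1 : p1 == k <;> by_cases h2 : p2 == k <;> simp [List.filter, h1, h2]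

lemma mapfilter_opsH (M N L m n h l : Int)
    (hm : 0 ≤ m ∧ m < M) (hn : 0 ≤ n ∧ n < N) (hh : 0 ≤ h ∧ h < 2) (hl : 0 ≤ l ∧ l < L) :
    ((opsH M N L).filter (fun p => p.1 == ((m, n, h, l) : Int × Int × Int × Int))).map (fun p => p.2)
    = if h = 1 then
        (if 0 < n then [(m, n - 1, 1, l)] else []) ++ (if n < N - 1 then [(m, n + 1, 1, l)] else [])
      else [] := by
  rw [opsH, chimTriples]
  simp only [List.flatMap_assoc, List.flatMap_map, List.filter_flatMap, List.map_flatMap,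
    filtermap_pair, beq_iff_eq, Prod.mk.injEq]
  have step1 : ∀ m' n' : Int,
      List.flatMap (fun l' =>
        (if m' = m ∧ n' = n ∧ (1:Int) = h ∧ l' = l then [(m', n' + 1, (1:Int), l')] else []) ++
        (if m' = m ∧ n' + 1 = n ∧ (1:Int) = h ∧ l' = l then [(m', n', (1:Int), l')] else []))
        (PySem.List.pyRange 0 L 1)
      = (if m' = m ∧ n' = n ∧ (1:Int) = h then [(m', n' + 1, (1:Int), l)] else []) ++
        (if m' = m ∧ n' + 1 = n ∧ (1:Int) = h then [(m', n', (1:Int), l)] else []) := by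
    intro m' n'
    have h0 := flatMap_pyRange_pointpair
      (fun x => m' = m ∧ n' = n ∧ (1:Int) = h ∧ x = l)
      (fun x => m' = m ∧ n' + 1 = n ∧ (1:Int) = h ∧ x = l)
      (m' = m ∧ n' = n ∧ (1:Int) = h) (m' = m ∧ n' + 1 = n ∧ (1:Int) = h)
      (fun x => [(m', n' + 1, (1:Int), x)]) (fun x => [(m', n', (1:Int), x)]) l
      (fun x => by omega) (fun x => by omega) (L - 0).toNat 0 L rfl
    rw [if_pos (show (0:Int) ≤ l ∧ l < L by omega)] at h0
    exact h0
  have step2 : ∀ m' : Int,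
      List.flatMap (fun n' =>
        (if m' = m ∧ n' = n ∧ (1:Int) = h then [(m', n' + 1, (1:Int), l)] else []) ++
        (if m' = m ∧ n' + 1 = n ∧ (1:Int) = h then [(m', n', (1:Int), l)] else []))
        (PySem.List.pyRange 0 (N - 1) 1)
      = (if (m' = m ∧ (1:Int) = h) ∧ 0 ≤ n - 1 ∧ n - 1 < N - 1 then [(m', n - 1, (1:Int), l)] else []) ++
        (if (m' = m ∧ (1:Int) = h) ∧ 0 ≤ n ∧ n < N - 1 then [(m', n + 1, (1:Int), l)] else []) := by
    intro m'
    exact flatMap_pyRange_doublepoint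
      (fun x => m' = m ∧ x = n ∧ (1:Int) = h) (fun x => m' = m ∧ x + 1 = n ∧ (1:Int) = h)
      (m' = m ∧ (1:Int) = h) (m' = m ∧ (1:Int) = h)
      (fun x => [(m', x + 1, (1:Int), l)]) (fun x => [(m', x, (1:Int), l)]) (n - 1) n (by omega)
      (fun x => by omega) (fun x => by omega) (N - 1 - 0).toNat 0 (N - 1) rfl
  have step3 :
      List.flatMap (fun m' =>
        (if (m' = m ∧ (1:Int) = h) ∧ 0 ≤ n - 1 ∧ n - 1 < N - 1 then [(m', n - 1, (1:Int), l)] else []) ++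
        (if (m' = m ∧ (1:Int) = h) ∧ 0 ≤ n ∧ n < N - 1 then [(m', n + 1, (1:Int), l)] else []))
        (PySem.List.pyRange 0 M 1)
      = (if ((1:Int) = h ∧ 0 ≤ n - 1 ∧ n - 1 < N - 1) then [(m, n - 1, (1:Int), l)] else []) ++
        (if ((1:Int) = h ∧ 0 ≤ n ∧ n < N - 1) then [(m, n + 1, (1:Int), l)] else []) := by
    have h0 := flatMap_pyRange_pointpair
      (fun x => (x = m ∧ (1:Int) = h) ∧ 0 ≤ n - 1 ∧ n - 1 < N - 1)
      (fun x => (x = m ∧ (1:Int) = h) ∧ 0 ≤ n ∧ n < N - 1)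
      ((1:Int) = h ∧ 0 ≤ n - 1 ∧ n - 1 < N - 1) ((1:Int) = h ∧ 0 ≤ n ∧ n < N - 1)
      (fun x => [(x, n - 1, (1:Int), l)]) (fun x => [(x, n + 1, (1:Int), l)]) m
      (fun x => by omega) (fun x => by omega) (M - 0).toNat 0 M rfl
    rw [if_pos (show (0:Int) ≤ m ∧ m < M by omega)] at h0
    exact h0
  rw [List.flatMap_congr (fun m' _ => List.flatMap_congr (fun n' _ => step1 m' n')),
      List.flatMap_congr (fun m' _ => step2 m'), step3]
  by_cases h1 : h = 1
  · subst h1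
    rw [if_pos rfl,
        if_congr (show ((1:Int) = 1 ∧ 0 ≤ n - 1 ∧ n - 1 < N - 1) ↔ 0 < n from by omega) rfl rfl,
        if_congr (show ((1:Int) = 1 ∧ 0 ≤ n ∧ n < N - 1) ↔ n < N - 1 from by omega) rfl rfl]
  · rw [if_neg (show ¬((1:Int) = h ∧ 0 ≤ n - 1 ∧ n - 1 < N - 1) from fun hc => h1 hc.1.symm),
        if_neg (show ¬((1:Int) = h ∧ 0 ≤ n ∧ n < N - 1) from fun hc => h1 hc.1.symm),
        if_neg h1]
    rfl

lemma mapfilter_opsV (M N L m n h l : Int)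
    (hm : 0 ≤ m ∧ m < M) (hn : 0 ≤ n ∧ n < N) (hh : 0 ≤ h ∧ h < 2) (hl : 0 ≤ l ∧ l < L) :
    ((opsV M N L).filter (fun p => p.1 == ((m, n, h, l) : Int × Int × Int × Int))).map (fun p => p.2)
    = if h = 0 then
        (if 0 < m then [(m - 1, n, 0, l)] else []) ++ (if m < M - 1 then [(m + 1, n, 0, l)] else [])
      else [] := by
  rw [opsV, chimTriples]
  simp only [List.flatMap_assoc, List.flatMap_map, List.filter_flatMap, List.map_flatMap,
    filtermap_pair, beq_iff_eq, Prod.mk.injEq]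
  have step1 : ∀ m' n' : Int,
      List.flatMap (fun l' =>
        (if m' = m ∧ n' = n ∧ (0:Int) = h ∧ l' = l then [(m' + 1, n', (0:Int), l')] else []) ++
        (if m' + 1 = m ∧ n' = n ∧ (0:Int) = h ∧ l' = l then [(m', n', (0:Int), l')] else []))
        (PySem.List.pyRange 0 L 1)
      = (if m' = m ∧ n' = n ∧ (0:Int) = h then [(m' + 1, n', (0:Int), l)] else []) ++
        (if m' + 1 = m ∧ n' = n ∧ (0:Int) = h then [(m', n', (0:Int), l)] else []) := by
    intro m' n'
    have h0 := flatMap_pyRange_pointpair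
      (fun x => m' = m ∧ n' = n ∧ (0:Int) = h ∧ x = l)
      (fun x => m' + 1 = m ∧ n' = n ∧ (0:Int) = h ∧ x = l)
      (m' = m ∧ n' = n ∧ (0:Int) = h) (m' + 1 = m ∧ n' = n ∧ (0:Int) = h)
      (fun x => [(m' + 1, n', (0:Int), x)]) (fun x => [(m', n', (0:Int), x)]) l
      (fun x => by omega) (fun x => by omega) (L - 0).toNat 0 L rfl
    rw [if_pos (show (0:Int) ≤ l ∧ l < L by omega)] at h0
    exact h0
  have step2 : ∀ m' : Int,
      List.flatMap (fun n' =>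
        (if m' = m ∧ n' = n ∧ (0:Int) = h then [(m' + 1, n', (0:Int), l)] else []) ++
        (if m' + 1 = m ∧ n' = n ∧ (0:Int) = h then [(m', n', (0:Int), l)] else []))
        (PySem.List.pyRange 0 N 1)
      = (if m' = m ∧ (0:Int) = h then [(m' + 1, n, (0:Int), l)] else []) ++
        (if m' + 1 = m ∧ (0:Int) = h then [(m', n, (0:Int), l)] else []) := by
    intro m'
    have h0 := flatMap_pyRange_pointpair
      (fun x => m' = m ∧ x = n ∧ (0:Int) = h)
      (fun x => m' + 1 = m ∧ x = n ∧ (0:Int) = h)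
      (m' = m ∧ (0:Int) = h) (m' + 1 = m ∧ (0:Int) = h)
      (fun x => [(m' + 1, x, (0:Int), l)]) (fun x => [(m', x, (0:Int), l)]) n
      (fun x => by omega) (fun x => by omega) (N - 0).toNat 0 N rfl
    rw [if_pos (show (0:Int) ≤ n ∧ n < N by omega)] at h0
    exact h0
  have step3 :
      List.flatMap (fun m' =>
        (if m' = m ∧ (0:Int) = h then [(m' + 1, n, (0:Int), l)] else []) ++
        (if m' + 1 = m ∧ (0:Int) = h then [(m', n, (0:Int), l)] else []))
        (PySem.List.pyRange 0 (M - 1) 1)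
      = (if ((0:Int) = h ∧ 0 ≤ m - 1 ∧ m - 1 < M - 1) then [(m - 1, n, (0:Int), l)] else []) ++
        (if ((0:Int) = h ∧ 0 ≤ m ∧ m < M - 1) then [(m + 1, n, (0:Int), l)] else []) := by
    exact flatMap_pyRange_doublepoint
      (fun x => x = m ∧ (0:Int) = h) (fun x => x + 1 = m ∧ (0:Int) = h)
      ((0:Int) = h) ((0:Int) = h)
      (fun x => [(x + 1, n, (0:Int), l)]) (fun x => [(x, n, (0:Int), l)]) (m - 1) m (by omega)
      (fun x => by omega) (fun x => by omega) (M - 1 - 0).toNat 0 (M - 1) rfl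
  rw [List.flatMap_congr (fun m' _ => List.flatMap_congr (fun n' _ => step1 m' n')),
      List.flatMap_congr (fun m' _ => step2 m'), step3]
  by_cases h0 : h = 0
  · subst h0
    rw [if_pos rfl,
        if_congr (show ((0:Int) = 0 ∧ 0 ≤ m - 1 ∧ m - 1 < M - 1) ↔ 0 < m from by omega) rfl rfl,
        if_congr (show ((0:Int) = 0 ∧ 0 ≤ m ∧ m < M - 1) ↔ m < M - 1 from by omega) rfl rfl]
  · rw [if_neg (show ¬((0:Int) = h ∧ 0 ≤ m - 1 ∧ m - 1 < M - 1) from fun hc => h0 hc.1.symm),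
        if_neg (show ¬((0:Int) = h ∧ 0 ≤ m ∧ m < M - 1) from fun hc => h0 hc.1.symm),
        if_neg h0]
    rfl

lemma opsH_keys_mem (M N L : Int) :
    ∀ x ∈ (opsH M N L).map (fun p => p.1), x ∈ chimNodes M N L := by
  intro x hx
  simp only [opsH, chimTriples, List.map_flatMap, List.mem_flatMap, List.mem_map,
    PySem.List.mem_pyRange_one, List.mem_cons, List.not_mem_nil, or_false] at hx
  obtain ⟨a, ⟨m', hm', n', hn', l', hl', rfl⟩, p, hp, rfl⟩ := hx
  rcases hp with rfl | rfl <;> exact mem_chimNodes.mpr (by dsimp only; omega)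

lemma opsV_keys_mem (M N L : Int) :
    ∀ x ∈ (opsV M N L).map (fun p => p.1), x ∈ chimNodes M N L := by
  intro x hx
  simp only [opsV, chimTriples, List.map_flatMap, List.mem_flatMap, List.mem_map,
    PySem.List.mem_pyRange_one, List.mem_cons, List.not_mem_nil, or_false] at hx
  obtain ⟨a, ⟨m', hm', n', hn', l', hl', rfl⟩, p, hp, rfl⟩ := hx
  rcases hp with rfl | rfl <;> exact mem_chimNodes.mpr (by dsimp only; omega)

lemma alt_eq_map (M N L : Int) :
    generate_chimera_adj_alt M N L
    = (chimNodes M N L).map (fun k =>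
        (k.1, k.2.1, k.2.2.1, k.2.2.2,
          ((PySem.List.pyRange 0 L 1).map (fun x => (k.1, k.2.1, 1 - k.2.2.1, x))) ++
          (if k.2.2.1 ≠ 0 then
            (if 0 < k.2.1 then [(k.1, k.2.1 - 1, 1, k.2.2.2)] else []) ++
            (if k.2.1 < N - 1 then [(k.1, k.2.1 + 1, 1, k.2.2.2)] else [])
          else
            (if 0 < k.1 then [(k.1 - 1, k.2.1, 0, k.2.2.2)] else []) ++
            (if k.1 < M - 1 then [(k.1 + 1, k.2.1, 0, k.2.2.2)] else [])))) := by
  simp only [generate_chimera_adj_alt, chimNodes, List.map_flatMap, List.map_map]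
  rfl

lemma phaseH_eq (M N L : Int) (d : PySem.Dict (Int × Int × Int × Int) (List (Int × Int × Int × Int))) :
    (chimTriples M (N - 1) L).foldl
      (fun d t => ((d.modify (t.1, t.2.1, 1, t.2.2) [] (· ++ [(t.1, t.2.1 + 1, 1, t.2.2)])).modify
        (t.1, t.2.1 + 1, 1, t.2.2) [] (· ++ [(t.1, t.2.1, 1, t.2.2)]))) d
    = (opsH M N L).foldl (fun d p => d.modify p.1 [] (· ++ [p.2])) d := by
  exact foldl_two_modify (chimTriples M (N - 1) L) (fun t => (t.1, t.2.1, 1, t.2.2))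
    (fun t => (t.1, t.2.1 + 1, 1, t.2.2)) (fun t => (t.1, t.2.1 + 1, 1, t.2.2))
    (fun t => (t.1, t.2.1, 1, t.2.2)) d

lemma phaseV_eq (M N L : Int) (d : PySem.Dict (Int × Int × Int × Int) (List (Int × Int × Int × Int))) :
    (chimTriples (M - 1) N L).foldl
      (fun d t => ((d.modify (t.1, t.2.1, 0, t.2.2) [] (· ++ [(t.1 + 1, t.2.1, 0, t.2.2)])).modify
        (t.1 + 1, t.2.1, 0, t.2.2) [] (· ++ [(t.1, t.2.1, 0, t.2.2)]))) d
    = (opsV M N L).foldl (fun d p => d.modify p.1 [] (· ++ [p.2])) d := by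
  exact foldl_two_modify (chimTriples (M - 1) N L) (fun t => (t.1, t.2.1, 0, t.2.2))
    (fun t => (t.1 + 1, t.2.1, 0, t.2.2)) (fun t => (t.1 + 1, t.2.1, 0, t.2.2))
    (fun t => (t.1, t.2.1, 0, t.2.2)) d

-- ===== VERDICT (by name: the statement is the Claim_ definition above) =====
theorem generate_chimera_adj_spec : Claim_equal_generate_chimera_adj := by
  intro M N L _
  unfold Spec_generate_chimera_adj
  simp only [generate_chimera_adj]
  rw [phaseH_eq, phaseV_eq]
  set d0 : PySem.Dict (Int × Int × Int × Int) (List (Int × Int × Int × Int)) :=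
    (chimNodes M N L).foldl
      (fun d k => d.insert k ((PySem.List.pyRange 0 L 1).map (fun x => (k.1, k.2.1, 1 - k.2.2.1, x))))
      PySem.Dict.empty with hd0
  set dH := (opsH M N L).foldl (fun d p => d.modify p.1 [] (· ++ [p.2])) d0 with hdH
  set dV := (opsV M N L).foldl (fun d p => d.modify p.1 [] (· ++ [p.2])) dH with hdV
  have hitems0 : d0.items = (chimNodes M N L).map
      (fun k => (k, (PySem.List.pyRange 0 L 1).map (fun x => (k.1, k.2.1, 1 - k.2.2.1, x)))) := by
    rw [hd0]
    have h0 := PySem.Dict.items_foldl_insert_fresh (chimNodes M N L) (fun a => a)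
      (fun a => (PySem.List.pyRange 0 L 1).map (fun x => (a.1, a.2.1, 1 - a.2.2.1, x)))
      PySem.Dict.empty (fun a _ => PySem.Dict.contains_empty a) (by simpa using chimNodes_nodup M N L)
    simpa using h0
  have hkeys0 : d0.keys = chimNodes M N L := by
    rw [PySem.Dict.keys, hitems0, List.map_map]
    exact (List.map_congr_left (fun a _ => rfl)).trans (List.map_id _)
  have hkeysH : dH.keys = chimNodes M N L := by
    rw [hdH, PySem.Dict.keys_foldl_modify_key (opsH M N L) (fun p => p.1) [] (fun _ p => (· ++ [p.2])) d0,
        hkeys0, set_update_of_subset _ _ (opsH_keys_mem M N L)]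
  have hkeysV : dV.keys = chimNodes M N L := by
    rw [hdV, PySem.Dict.keys_foldl_modify_key (opsV M N L) (fun p => p.1) [] (fun _ p => (· ++ [p.2])) dH,
        hkeysH, set_update_of_subset _ _ (opsV_keys_mem M N L)]
  have hnodupV : dV.keys.Nodup := by rw [hkeysV]; exact chimNodes_nodup M N L
  rw [PySem.Dict.items_eq_map_keys dV hnodupV [], hkeysV, List.map_map, alt_eq_map]
  refine List.map_congr_left ?_
  rintro ⟨m, n, h, l⟩ hk
  obtain ⟨hbm, hbn, hbh, hbl⟩ := mem_chimNodes.mp hk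
  have hget0 : d0.getD (m, n, h, l) [] = (PySem.List.pyRange 0 L 1).map (fun x => (m, n, 1 - h, x)) := by
    refine PySem.Dict.getD_of_mem_items d0 ?_ (by rw [hkeys0]; exact chimNodes_nodup M N L) []
    rw [hitems0]
    simpa using List.mem_map_of_mem
      (f := fun k : Int × Int × Int × Int =>
        (k, (PySem.List.pyRange 0 L 1).map (fun x => (k.1, k.2.1, 1 - k.2.2.1, x)))) hk
  have hgetV : dV.getD (m, n, h, l) []
      = d0.getD (m, n, h, l) []
        ++ ((opsH M N L).filter (fun p => p.1 == ((m, n, h, l) : Int × Int × Int × Int))).map (fun p => p.2)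
        ++ ((opsV M N L).filter (fun p => p.1 == ((m, n, h, l) : Int × Int × Int × Int))).map (fun p => p.2) := by
    rw [hdV, PySem.Dict.getD_foldl_modify_append (opsV M N L) dH ((m, n, h, l) : Int × Int × Int × Int),
        hdH, PySem.Dict.getD_foldl_modify_append (opsH M N L) d0 ((m, n, h, l) : Int × Int × Int × Int)]
  dsimp only [Function.comp]
  rw [hgetV, hget0, mapfilter_opsH M N L m n h l hbm hbn hbh hbl,
      mapfilter_opsV M N L m n h l hbm hbn hbh hbl]
  rcases (show h = 0 ∨ h = 1 by omega) with rfl | rfl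
  · rw [if_neg (show ¬((0:Int) = 1) by decide), if_pos rfl, List.append_nil,
        if_neg (show ¬((0:Int) ≠ 0) from fun hc => hc rfl)]
  · rw [if_pos rfl, if_neg (show ¬((1:Int) = 0) by decide), List.append_nil,
        if_pos (show ((1:Int) ≠ 0) by decide)]
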